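-- pv_equiv track=rewrite | github.com/jarrodmillman/capstone | tools/nb2rst.py | proc_body
-- ===== SOURCE A (Python) =====
-- def line_indent(line):
--     return len(line) - len(line.lstrip())
--
-- def is_empty(line):
--     return line.strip() == ''
--
-- def proc_body(body, indent):
--     spaces = ' ' * indent
--     new_body = ['.. plot::\n', spaces + ':context:\n']
--     plts = [line for line in body if line.strip().startswith('plt.')]
--     if len(plts) == 0:
--         new_body.append(spaces + ':nofigs:\n')
--     new_body.append('\n')
--     # Ignore trailing blank lines
--     n_good = len(body)
--     for line in body[::-1]:
--         if not is_empty(line):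
--             break
--         n_good -= 1
--
--     for line in body[:n_good]:
--         if is_empty(line):
--             new_body.append(line)
--             continue
--         L_indent = line_indent(line)
--         if L_indent == indent:
--             new_line = spaces + '>>> ' + line.lstrip()
--             new_body.append(new_line)
--             continue
--         extra_spaces = ' ' * (L_indent - indent)
--         new_line = spaces + '... ' + extra_spaces + line.lstrip()
--         new_body.append(new_line)
--     return new_body
-- ===== SOURCE B (Python) =====
-- def proc_body(body, indent):
--     spaces = ' ' * indent
--     out = ['.. plot::\n', spaces + ':context:\n']
--     if not any(line.strip().startswith('plt.') for line in body):
--         out.append(spaces + ':nofigs:\n')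
--     out.append('\n')
--     pending = []
--     for line in body:
--         if line.strip() == '':
--             pending.append(line)
--         else:
--             out += pending
--             pending = []
--             stripped = line.lstrip()
--             offset = len(line) - len(stripped)
--             out.append(spaces + '>>> ' + stripped if offset == indent
--                        else spaces + '... ' + ' ' * (offset - indent) + stripped)
--     return out
-- ===== Notes on version B (the rewrite author's own statement) =====
-- stated objective: alternative
-- what changed: Replaces A's reverse scan for the trailing-blank count plus a slice and a second forward loop with a single forward pass that buffers blank lines in a pending list and flushes it at the next non-blank line, so trailing blanks are dropped without ever scanning backwards; the plt-detection is an any() instead of building a filtered list.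
import Mathlib
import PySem

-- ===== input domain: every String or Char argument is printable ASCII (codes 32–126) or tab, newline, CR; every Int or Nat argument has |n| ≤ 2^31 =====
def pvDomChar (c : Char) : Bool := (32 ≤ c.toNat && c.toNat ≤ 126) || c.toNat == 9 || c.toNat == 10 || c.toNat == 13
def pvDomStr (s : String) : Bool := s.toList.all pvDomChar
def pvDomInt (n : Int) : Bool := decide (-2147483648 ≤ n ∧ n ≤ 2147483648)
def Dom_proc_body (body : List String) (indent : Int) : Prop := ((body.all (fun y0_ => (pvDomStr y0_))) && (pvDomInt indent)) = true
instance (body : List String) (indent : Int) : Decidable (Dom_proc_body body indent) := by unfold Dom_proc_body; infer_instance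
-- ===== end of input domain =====

-- B replaces A's reverse scan for trailing blanks + slice + second forward loop by one
-- forward pass with a pending-blank buffer (objective: alternative decomposition, same cost).

-- ===== PORT A =====
-- ' ' * n for an Int n: n.toNat spaces (Python gives '' for n ≤ 0) — hand-ported, exact.
def pvSpaces (n : Int) : String := String.ofList (List.replicate n.toNat ' ')

-- A's reverse loop computing n_good (break at the first non-empty line from the end)
def procBodyNGood : List String → Int → Int
  | [], n => n
  | line :: rest, n =>
    if !(PySem.Str.strip line == "") then n else procBodyNGood rest (n - 1)

def proc_body (body : List String) (indent : Int) : List String :=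
  let spaces := pvSpaces indent
  let new_body := [".. plot::\n", spaces ++ ":context:\n"]
  let plts := body.filter (fun line => PySem.Str.startswith (PySem.Str.strip line) "plt.")
  let new_body := if plts.length == 0 then new_body ++ [spaces ++ ":nofigs:\n"] else new_body
  let new_body := new_body ++ ["\n"]
  -- body[::-1] is body.reverse (PySem.List.slice?_none_none_neg_one)
  let n_good := procBodyNGood body.reverse (body.length : Int)
  (PySem.List.slice body none (some n_good)).foldl
    (fun acc line =>
      if PySem.Str.strip line == "" then acc ++ [line]
      else if ((PySem.Str.len line : Int) - (PySem.Str.len (PySem.Str.lstrip line) : Int)) == indent then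
        acc ++ [spaces ++ ">>> " ++ PySem.Str.lstrip line]
      else
        acc ++ [spaces ++ "... " ++ pvSpaces (((PySem.Str.len line : Int) - (PySem.Str.len (PySem.Str.lstrip line) : Int)) - indent) ++ PySem.Str.lstrip line])
    new_body

-- ===== PORT B =====
def proc_body_alt (body : List String) (indent : Int) : List String :=
  let spaces := pvSpaces indent
  let out := [".. plot::\n", spaces ++ ":context:\n"]
  let out := if !(body.any (fun line => PySem.Str.startswith (PySem.Str.strip line) "plt.")) then
      out ++ [spaces ++ ":nofigs:\n"] else out
  let out := out ++ ["\n"]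
  (body.foldl
    (fun (s : List String × List String) line =>
      if PySem.Str.strip line == "" then (s.1, s.2 ++ [line])
      else
        (s.1 ++ s.2 ++ [if ((PySem.Str.len line : Int) - (PySem.Str.len (PySem.Str.lstrip line) : Int)) == indent then
            spaces ++ ">>> " ++ PySem.Str.lstrip line
          else
            spaces ++ "... " ++ pvSpaces (((PySem.Str.len line : Int) - (PySem.Str.len (PySem.Str.lstrip line) : Int)) - indent) ++ PySem.Str.lstrip line], []))
    (out, [])).1

-- ===== PRECONDITION & SPEC =====
def Spec_proc_body (body : List String) (indent : Int) (out : List String) : Prop := out = proc_body_alt body indent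
instance (body : List String) (indent : Int) (out : List String) : Decidable (Spec_proc_body body indent out) := by unfold Spec_proc_body; infer_instance

-- ===== CLAIM (what is proved, stated in full; the proofs are below) =====
def Claim_equal_proc_body : Prop := ∀ (body : List String) (indent : Int), Dom_proc_body body indent → Spec_proc_body body indent (proc_body body indent)

-- ===== LEMMAS AND PROOFS =====

-- the body with its trailing blank lines removed
def pvTrim (blank : String → Bool) (l : List String) : List String :=
  (l.reverse.dropWhile blank).reverse

theorem pvTrim_eq_nil (blank : String → Bool) (l : List String)
    (h : l.all blank = true) : pvTrim blank l = [] := by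
  unfold pvTrim
  have : l.reverse.dropWhile blank = [] := by
    rw [List.dropWhile_eq_nil_iff]
    intro x hx
    exact List.all_eq_true.mp h x (List.mem_reverse.mp hx)
  rw [this]; rfl

theorem pvTrim_cons (blank : String → Bool) (x : String) (l : List String)
    (h : (x :: l).all blank = false) : pvTrim blank (x :: l) = x :: pvTrim blank l := by
  unfold pvTrim
  rw [List.reverse_cons, List.dropWhile_append]
  by_cases hall : l.all blank = true
  · have hd : l.reverse.dropWhile blank = [] := by
      rw [List.dropWhile_eq_nil_iff]
      intro y hy
      exact List.all_eq_true.mp hall y (List.mem_reverse.mp hy)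
    have hx : blank x = false := by
      by_contra hbx
      have : (x :: l).all blank = true := by
        simp [List.all_cons, hall]
        exact Bool.of_not_eq_false hbx
      simp [this] at h
    simp [hd, List.dropWhile, hx]
  · have hd : l.reverse.dropWhile blank ≠ [] := by
      intro hnil
      apply hall
      rw [List.all_eq_true]
      intro y hy
      exact List.dropWhile_eq_nil_iff.mp hnil y (List.mem_reverse.mpr hy)
    have : (l.reverse.dropWhile blank).isEmpty = false := by
      cases he : l.reverse.dropWhile blank with
      | nil => exact absurd he hd
      | cons a t => rfl
    simp [this]

theorem pvNGood_eq (l : List String) (n : Int) :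
    procBodyNGood l n = n - ((l.takeWhile (fun line => PySem.Str.strip line == "")).length : Int) := by
  induction l generalizing n with
  | nil => simp [procBodyNGood]
  | cons x xs ih =>
    by_cases hx : (PySem.Str.strip x == "") = true
    · simp [procBodyNGood, hx, ih]
      ring
    · simp [procBodyNGood, hx]

theorem pvTake_trim (blank : String → Bool) (body : List String) :
    body.take (body.length - (body.reverse.takeWhile blank).length) = pvTrim blank body := by
  have hdec : body = pvTrim blank body ++ (body.reverse.takeWhile blank).reverse := by
    unfold pvTrim
    conv_lhs => rw [← List.reverse_reverse body, ← List.takeWhile_append_dropWhile (p := blank) (l := body.reverse)]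
    rw [List.reverse_append]
  have hlen : (pvTrim blank body).length = body.length - (body.reverse.takeWhile blank).length := by
    have := congrArg List.length hdec
    simp at this
    omega
  have hres := List.take_left' (l₁ := pvTrim blank body)
    (l₂ := (body.reverse.takeWhile blank).reverse)
    (i := body.length - (body.reverse.takeWhile blank).length) hlen
  rw [← hdec] at hres
  exact hres

theorem pvFilterLenZero (p : String → Bool) (body : List String) :
    ((body.filter p).length == 0) = !(body.any p) := by
  by_cases h : body.any p = true
  · obtain ⟨x, hx, hpx⟩ := List.any_eq_true.mp h
    have hm : x ∈ body.filter p := List.mem_filter.mpr ⟨hx, hpx⟩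
    have : (body.filter p).length ≠ 0 := by
      intro hz
      rw [List.length_eq_zero_iff] at hz
      rw [hz] at hm
      simp at hm
    simp [h, this]
  · have h' : body.any p = false := by simpa using h
    have : body.filter p = [] := by
      rw [List.filter_eq_nil_iff]
      intro a ha
      have := List.any_eq_false.mp h' a ha
      simpa using this
    simp [h', this]

theorem pvBloop (blank : String → Bool) (g : String → String) (l : List String)
    (out pending : List String) :
    (l.foldl
      (fun (s : List String × List String) line =>
        if blank line then (s.1, s.2 ++ [line]) else (s.1 ++ s.2 ++ [g line], []))
      (out, pending)).1
    = out ++ (if l.all blank then [] else pending ++ (pvTrim blank l).map (fun x => if blank x then x else g x)) := by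
  induction l generalizing out pending with
  | nil => simp
  | cons x xs ih =>
    by_cases hx : blank x = true
    · rw [List.foldl_cons]
      simp only [hx, if_true]
      rw [ih]
      by_cases hall : xs.all blank = true
      · simp [List.all_cons, hx, hall]
      · have h2 : (x :: xs).all blank = false := by simp [List.all_cons, hall]
        rw [pvTrim_cons _ _ _ h2]
        simp [List.all_cons, hall, hx]
    · rw [List.foldl_cons]
      simp only [hx, if_false, Bool.false_eq_true]
      rw [ih]
      have h2 : (x :: xs).all blank = false := by simp [List.all_cons, hx]
      rw [pvTrim_cons _ _ _ h2]
      by_cases hall : xs.all blank = true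
      · rw [pvTrim_eq_nil _ _ hall]
        simp [hall, hx]
      · simp [hall, hx, List.all_cons]

theorem proc_body_spec : Claim_equal_proc_body := by
  intro body indent _
  unfold Spec_proc_body proc_body proc_body_alt
  simp only [pvFilterLenZero, pvNGood_eq]
  have ht : (body.reverse.takeWhile (fun line => PySem.Str.strip line == "")).length ≤ body.length := by
    have h1 := (List.takeWhile_sublist (p := fun line => PySem.Str.strip line == "") (l := body.reverse)).length_le
    simpa using h1
  have h0 : (0:Int) ≤ (body.length : Int) - ((body.reverse.takeWhile (fun line => PySem.Str.strip line == "")).length : Int) := by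
    omega
  rw [PySem.List.slice_to _ h0]
  have htn : ((body.length : Int) - ((body.reverse.takeWhile (fun line => PySem.Str.strip line == "")).length : Int)).toNat
      = body.length - (body.reverse.takeWhile (fun line => PySem.Str.strip line == "")).length := by
    omega
  rw [htn, pvTake_trim, pvBloop]
  have hstep : (fun (acc : List String) line =>
      if PySem.Str.strip line == "" then acc ++ [line]
      else if ((PySem.Str.len line : Int) - (PySem.Str.len (PySem.Str.lstrip line) : Int)) == indent then
        acc ++ [pvSpaces indent ++ ">>> " ++ PySem.Str.lstrip line]
      else
        acc ++ [pvSpaces indent ++ "... " ++ pvSpaces (((PySem.Str.len line : Int) - (PySem.Str.len (PySem.Str.lstrip line) : Int)) - indent) ++ PySem.Str.lstrip line])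
      = fun (acc : List String) line => acc ++
        [if PySem.Str.strip line == "" then line
         else if ((PySem.Str.len line : Int) - (PySem.Str.len (PySem.Str.lstrip line) : Int)) == indent then
           pvSpaces indent ++ ">>> " ++ PySem.Str.lstrip line
         else
           pvSpaces indent ++ "... " ++ pvSpaces (((PySem.Str.len line : Int) - (PySem.Str.len (PySem.Str.lstrip line) : Int)) - indent) ++ PySem.Str.lstrip line] := by
    funext acc line
    split_ifs <;> rfl
  rw [hstep]
  rw [PySem.List.foldl_append_singleton_eq_map
    (f := fun line =>
      if PySem.Str.strip line == "" then line
      else if ((PySem.Str.len line : Int) - (PySem.Str.len (PySem.Str.lstrip line) : Int)) == indent then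
        pvSpaces indent ++ ">>> " ++ PySem.Str.lstrip line
      else
        pvSpaces indent ++ "... " ++ pvSpaces (((PySem.Str.len line : Int) - (PySem.Str.len (PySem.Str.lstrip line) : Int)) - indent) ++ PySem.Str.lstrip line)]
  by_cases hall : body.all (fun line => PySem.Str.strip line == "") = true
  · rw [pvTrim_eq_nil _ _ hall]
    simp [hall]
  · simp only [hall]
    simp
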